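-- pv_equiv track=rewrite | github.com/azzahraamonra-etu/kattis | src/kattis/fallingleaves.py | fallingleaves
-- ===== SOURCE A (Python) =====
-- def fallingleaves(input_lines: list[str]) -> list[str]:
--     """
--     Solves the fallingleaves problem from Kattis.
--     URL: https://open.kattis.com/problems/fallingleaves
--
--     Args:
--     input_lines (list[str]): List of input lines, containing tree levels and commands.
--
--     Returns:
--     list[str]: List of preorder traversals of constructed BSTs after each '*' or '$' command.
--     """
--
--     def build_bst_and_preorder(tree_data):
--         tree_data = tree_data[::-1]
--         root = None
--         for level in tree_data:
--             for ch in level: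
--                 if root is None:
--                     root = [ch, None, None]
--                 else:
--                     curr = root
--                     while True:
--                         if ch < curr[0]:
--                             if curr[1] is None:
--                                 curr[1] = [ch, None, None]
--                                 break
--                             curr = curr[1]
--                         else:
--                             if curr[2] is None:
--                                 curr[2] = [ch, None, None]
--                                 break
--                             curr = curr[2]
--
--         # Preorder traversal
--         stack = [root]
--         result = ''
--         while stack:
--             node = stack.pop()
--             if node:
--                 result += node[0]
--                 stack.append(node[2])  # Right child
--                 stack.append(node[1])  # Left child
--         return result
--
--     tree_data = []
--     results = []
--
--     for line in input_lines:
--         if line == '$':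
--             if tree_data:
--                 results.append(build_bst_and_preorder(tree_data))
--                 tree_data = []
--             break
--         elif line == '*':
--             results.append(build_bst_and_preorder(tree_data))
--             tree_data = []
--         else:
--             tree_data.append(line)
--
--     return results
-- ===== SOURCE B (Python) =====
-- def fallingleaves(input_lines: list[str]) -> list[str]:
--     # Treeless: the preorder of a BST built by successive insertion (ties right)
--     # is root, then preorder of the smaller-subsequence, then of the rest.
--     def preorder(chars):
--         if not chars:
--             return ''
--         root, rest = chars[0], chars[1:]
--         return (root
--                 + preorder([c for c in rest if c < root])
--                 + preorder([c for c in rest if c >= root]))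
--
--     tree_data = []
--     results = []
--     for line in input_lines:
--         if line == '$':
--             if tree_data:
--                 results.append(preorder(''.join(reversed(tree_data))))
--             break
--         elif line == '*':
--             results.append(preorder(''.join(reversed(tree_data))))
--             tree_data = []
--         else:
--             tree_data.append(line)
--     return results
-- ===== Notes on version B (the rewrite author's own statement) =====
-- stated objective: alternative
-- what changed: B never builds a tree: it computes the BST preorder directly by a quicksort-style partition recursion (root, then the smaller-than-root subsequence's preorder, then the rest's), replacing A's mutable linked-node insertion and explicit-stack traversal.
import Mathlib
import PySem

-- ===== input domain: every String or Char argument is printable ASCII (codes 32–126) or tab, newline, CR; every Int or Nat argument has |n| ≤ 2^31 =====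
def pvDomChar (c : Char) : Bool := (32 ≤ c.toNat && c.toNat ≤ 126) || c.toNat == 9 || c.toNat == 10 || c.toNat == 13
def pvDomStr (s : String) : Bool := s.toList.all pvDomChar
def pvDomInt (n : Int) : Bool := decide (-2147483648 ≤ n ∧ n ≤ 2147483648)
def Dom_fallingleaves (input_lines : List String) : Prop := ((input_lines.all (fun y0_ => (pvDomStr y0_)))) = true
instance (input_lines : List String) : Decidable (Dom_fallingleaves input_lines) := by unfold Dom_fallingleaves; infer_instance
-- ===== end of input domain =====

-- B computes each BST preorder by a partition recursion instead of A's mutable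
-- node insertion plus explicit-stack traversal; same outputs, similar cost.

-- ===== PORT A =====
-- A's mutable [ch, left, right] node lists become an inductive tree.
inductive BTree where
  | nil : BTree
  | node : Char → BTree → BTree → BTree
deriving DecidableEq, Repr

def BTree.size : BTree → Nat
  | .nil => 0
  | .node _ l r => 1 + l.size + r.size

-- A's while-loop descends and attaches the new node in place; functionally that
-- is this recursion rebuilding the descent path (ties go right, as in A's else).
def insertA : BTree → Char → BTree
  | .nil, c => .node c .nil .nil
  | .node k l r, c => if c < k then .node k (insertA l c) r else .node k l (insertA r c)

-- A's explicit-stack preorder loop (pop; emit key; push right then left).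
def preA : List BTree → List Char
  | [] => []
  | .nil :: st => preA st
  | .node k l r :: st => k :: preA (l :: r :: st)
termination_by st => ((st.map BTree.size).sum, st.length)
decreasing_by
  · simp only [List.map_cons, List.sum_cons, BTree.size, List.length_cons, Nat.zero_add]
    exact Prod.Lex.right _ (Nat.lt_succ_self _)
  · apply Prod.Lex.left; simp [BTree.size]; omega

-- build_bst_and_preorder: reverse levels, insert every char, stack preorder.
def chunkA (td : List String) : String :=
  String.ofList (preA [((td.reverse.map String.toList).flatten).foldl insertA .nil])

def loopA : List String → List String → List String
  | [], _td => []
  | line :: rest, td =>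
    if line = "$" then (if td ≠ [] then [chunkA td] else [])
    else if line = "*" then chunkA td :: loopA rest []
    else loopA rest (td ++ [line])

def fallingleaves (input_lines : List String) : List String :=
  loopA input_lines []

-- ===== PORT B =====
-- B's treeless preorder: root, then preorder of the smaller chars, then the rest.
def qpre : List Char → List Char
  | [] => []
  | c :: rest =>
      c :: (qpre (rest.filter (fun x => x < c)) ++ qpre (rest.filter (fun x => ¬ x < c)))
termination_by s => s.length
decreasing_by
  all_goals
    simp only [List.length_unattach]
    exact Nat.lt_succ_of_le (le_trans (List.length_filter_le _ _) (by simp))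

def chunkB (td : List String) : String :=
  String.ofList (qpre ((td.reverse.map String.toList).flatten))

def loopB : List String → List String → List String
  | [], _td => []
  | line :: rest, td =>
    if line = "$" then (if td ≠ [] then [chunkB td] else [])
    else if line = "*" then chunkB td :: loopB rest []
    else loopB rest (td ++ [line])

def fallingleaves_alt (input_lines : List String) : List String :=
  loopB input_lines []

-- ===== PRECONDITION & SPEC =====
def Spec_fallingleaves (input_lines : List String) (out : List String) : Prop := out = fallingleaves_alt input_lines
instance (input_lines : List String) (out : List String) : Decidable (Spec_fallingleaves input_lines out) := by unfold Spec_fallingleaves; infer_instance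

-- ===== CLAIM (what is proved, stated in full; the proofs are below) =====
def Claim_equal_fallingleaves : Prop := ∀ (input_lines : List String), Dom_fallingleaves input_lines → Spec_fallingleaves input_lines (fallingleaves input_lines)

-- ===== LEMMAS AND PROOFS =====

-- Recursive preorder of one tree.
def preT : BTree → List Char
  | .nil => []
  | .node k l r => k :: (preT l ++ preT r)

theorem preA_eq (st : List BTree) : preA st = (st.map preT).flatten := by
  induction st using preA.induct with
  | case1 => simp [preA]
  | case2 st ih => simp [preA, preT, ih]
  | case3 k l r st ih => simp [preA, preT, ih]

theorem foldl_insert_node (s : List Char) (k : Char) (l r : BTree) :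
    s.foldl insertA (.node k l r) =
      .node k ((s.filter (fun x => x < k)).foldl insertA l)
              ((s.filter (fun x => ¬ x < k)).foldl insertA r) := by
  induction s generalizing l r with
  | nil => simp
  | cons c s ih =>
      by_cases h : c < k
      · simp [insertA, h, ih, not_lt]
      · have h' : k ≤ c := not_lt.mp h
        simp [insertA, h, h', ih, not_lt]

theorem preT_build (s : List Char) : preT (s.foldl insertA .nil) = qpre s := by
  induction s using qpre.induct with
  | case1 => simp [preT, qpre]
  | case2 c rest ih1 ih2 =>
      rw [List.unattach_filter (g := fun x => decide (x < c)) (hf := fun _ _ => rfl),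
          List.unattach_attach] at ih1
      rw [List.unattach_filter (g := fun x => decide (¬ x < c)) (hf := fun _ _ => rfl),
          List.unattach_attach] at ih2
      simp at ih1 ih2
      simp [qpre, insertA, foldl_insert_node, preT, not_lt, ih1, ih2]

theorem chunk_eq (td : List String) : chunkA td = chunkB td := by
  simp [chunkA, chunkB, preA_eq, preT_build]

theorem loop_eq (lines : List String) (td : List String) : loopA lines td = loopB lines td := by
  induction lines generalizing td with
  | nil => rfl
  | cons line rest ih => simp [loopA, loopB, chunk_eq, ih]

-- ===== VERDICT (by name: the statement is the Claim_ definition above) =====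
theorem fallingleaves_spec : Claim_equal_fallingleaves := by
  intro input_lines _
  unfold Spec_fallingleaves fallingleaves fallingleaves_alt
  exact loop_eq input_lines []
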